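-- pv_equiv track=rewrite | github.com/shajoezhu/smcsmc-1 | smcsmc/utils.py | dict_to_args
-- ===== SOURCE A (Python) =====
-- def dict_to_args(smcsmc_params):
--     '''
--     Converts a dictionary of arguments into smcsmc compatible input.
--
--     Parameters
--     ----------
--     smcsmc_params : dict
--         A dictionary of arguments. See documentation for details.
--
--     Returns
--     -------
--     args : list of arguments
--         A list of arguments suitable for processing by `smcsmc.Smcsmc`.
--
--     See Also
--     --------
--     run_smcsmc : Use these arguments to run `smcsmc`.
--     '''
--     args = []
--     [args.extend(['-' + k, v]) for k, v in smcsmc_params.items()]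
--
--     # Remove the empty flags to expose the booleans
--     args = [arg for arg in args if arg != '']
--
--     # Remove any entries turned off by None flags.
--     idx = [i for i,x in enumerate(args) if x == "None" or x is None]
--     idx = idx + [i - 1 for i in idx]
--
--     # By deleting in revrese, avoid moving idxs
--     idx.sort(reverse=True)
--     for i in idx:
--         del args[i]
--
--     args = [a for b in args for a in b.split()]
--
--     return(args)
-- ===== SOURCE B (Python) =====
-- def dict_to_args(smcsmc_params):
--     '''One-pass conversion of the params dict to a CLI argument list:
--     keys with a None/"None" value are skipped together with their flag,
--     an empty-string value contributes only its flag; the final whitespace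
--     split of every piece is kept.'''
--     out = []
--     for k, v in smcsmc_params.items():
--         if v is None or v == "None":
--             continue
--         out.append('-' + k)
--         if v != '':
--             out.append(v)
--     return [a for b in out for a in b.split()]
-- ===== Notes on version B (the rewrite author's own statement) =====
-- stated objective: simpler
-- what changed: Replaces A's four phases (build flat flag/value list, filter out '' entries, collect indices of None/'None' entries plus their predecessors, reverse-sort and delete by index) with a single pass over the items that skips None/'None' pairs and emits the flag, and the value when non-empty, directly; the final whitespace-split flatten is kept.
import Mathlib
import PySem

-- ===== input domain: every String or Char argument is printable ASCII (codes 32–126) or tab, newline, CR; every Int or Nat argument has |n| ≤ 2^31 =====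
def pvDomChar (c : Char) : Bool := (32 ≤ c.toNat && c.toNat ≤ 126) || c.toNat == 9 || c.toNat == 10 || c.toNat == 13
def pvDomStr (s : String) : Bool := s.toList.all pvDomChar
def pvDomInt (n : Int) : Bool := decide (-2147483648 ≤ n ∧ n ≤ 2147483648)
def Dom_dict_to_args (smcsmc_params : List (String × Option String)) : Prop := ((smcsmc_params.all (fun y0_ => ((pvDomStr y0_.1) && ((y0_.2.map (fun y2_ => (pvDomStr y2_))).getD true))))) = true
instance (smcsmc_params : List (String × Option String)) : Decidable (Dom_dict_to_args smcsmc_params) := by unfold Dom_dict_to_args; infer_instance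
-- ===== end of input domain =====

-- B replaces A's build / filter '' / index-collect / reverse-sort / delete-by-index phases
-- with a single pass that skips None/"None" pairs and emits flag (and non-empty value) directly; simpler.


-- ===== PORT A =====
-- 'del args[i]' with Python's negative-index wraparound (only nonnegative i is ever reached here)
def pyDelAt {α : Type} (l : List α) (i : Int) : List α :=
  if i < 0 then l.eraseIdx (l.length - (-i).toNat) else l.eraseIdx i.toNat

def dict_to_args (smcsmc_params : List (String × Option String)) : List String :=
  let items := (PySem.Dict.ofList smcsmc_params).items
  -- [args.extend(['-' + k, v]) for k, v in smcsmc_params.items()]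
  let args0 : List (Option String) :=
    items.foldl (fun acc kv => acc ++ [some ("-" ++ kv.1), kv.2]) []
  -- args = [arg for arg in args if arg != '']
  let args1 := args0.filter (fun a => !(a == some ""))
  -- idx = [i for i,x in enumerate(args) if x == "None" or x is None]
  let idx : List Int :=
    ((PySem.List.enumerate args1).filter (fun p => p.2 == some "None" || p.2 == none)).map (·.1)
  -- idx = idx + [i - 1 for i in idx]
  let idx2 := idx ++ idx.map (· - 1)
  -- idx.sort(reverse=True)
  let idx3 := PySem.List.sorted idx2 (fun i => i) true
  -- for i in idx: del args[i]
  let args2 := idx3.foldl (fun l i => pyDelAt l i) args1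
  -- args = [a for b in args for a in b.split()]  (b is never None here: every None entry was deleted)
  args2.flatMap (fun b => match b with | some s => PySem.Str.split₀ s | none => [])

-- ===== PORT B =====
def dict_to_args_alt (smcsmc_params : List (String × Option String)) : List String :=
  let items := (PySem.Dict.ofList smcsmc_params).items
  let out : List String :=
    items.foldl (fun acc kv =>
      match kv.2 with
      | none => acc
      | some v =>
        if v = "None" then acc
        else acc ++ ["-" ++ kv.1] ++ (if v = "" then [] else [v])) []
  out.flatMap (fun b => PySem.Str.split₀ b)

-- ===== PRECONDITION & SPEC =====
def Spec_dict_to_args (smcsmc_params : List (String × Option String)) (out : List String) : Prop := out = dict_to_args_alt smcsmc_params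
instance (smcsmc_params : List (String × Option String)) (out : List String) : Decidable (Spec_dict_to_args smcsmc_params out) := by unfold Spec_dict_to_args; infer_instance

-- ===== CLAIM (what is proved, stated in full; the proofs are below) =====
def Claim_equal_dict_to_args : Prop := ∀ (smcsmc_params : List (String × Option String)), Dom_dict_to_args smcsmc_params → Spec_dict_to_args smcsmc_params (dict_to_args smcsmc_params)

-- ===== LEMMAS AND PROOFS =====

-- proof-only vocabulary: per-pair blocks of A's intermediate lists
def pvBad (v : Option String) : Bool := v == some "None" || v == none

def pvFBlock (kv : String × Option String) : List (Option String) :=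
  some ("-" ++ kv.1) :: (if kv.2 == some "" then [] else [kv.2])

def pvGBlock (kv : String × Option String) : List (Option String) :=
  if pvBad kv.2 then [] else pvFBlock kv

def pvB (kv : String × Option String) : List String :=
  match kv.2 with
  | none => []
  | some v => if v = "None" then [] else ["-" ++ kv.1] ++ (if v = "" then [] else [v])

def pvSplitOpt (b : Option String) : List String :=
  match b with | some s => PySem.Str.split₀ s | none => []

-- indices of the bad (None/"None") entries of the filtered list, and those indices
-- together with their predecessors, in ascending order
def pvBadIdx : List (String × Option String) → Nat → List Int
  | [], _ => []
  | p :: rest, n =>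
    (if p.2 == some "" then [] else if pvBad p.2 then [(n : Int) + 1] else [])
      ++ pvBadIdx rest (n + (pvFBlock p).length)

def pvAsc : List (String × Option String) → Nat → List Int
  | [], _ => []
  | p :: rest, n =>
    (if p.2 == some "" then [] else if pvBad p.2 then [(n : Int), (n : Int) + 1] else [])
      ++ pvAsc rest (n + (pvFBlock p).length)

lemma pvFlag_not_bad (k : String) :
    ((some ("-" ++ k) : Option String) == some "None" ||
      (some ("-" ++ k) : Option String) == none) = false := by
  simp [String.ext_iff]

lemma pvFlag_ne_empty (k : String) : (("-" ++ k) == "") = false := by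
  simp [String.ext_iff]

lemma pvFilter_eq (L : List (String × Option String)) :
    (L.flatMap (fun kv => [some ("-" ++ kv.1), kv.2])).filter (fun a => !(a == some "")) =
      L.flatMap pvFBlock := by
  induction L with
  | nil => rfl
  | cons p rest ih =>
    simp only [List.flatMap_cons, List.filter_append, ih]
    congr 1
    cases h : (p.2 == (some "" : Option String)) <;>
      simp [List.filter, pvFBlock, h, pvFlag_ne_empty]

lemma pvBadIdx_eq (L : List (String × Option String)) (n : Nat) :
    ((PySem.List.enumerate (L.flatMap pvFBlock) (n : Int)).filter
        (fun p => p.2 == some "None" || p.2 == none)).map (·.1) = pvBadIdx L n := by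
  induction L generalizing n with
  | nil => rfl
  | cons p rest ih =>
    have hflag := pvFlag_not_bad p.1
    cases h : (p.2 == (some "" : Option String)) with
    | true =>
      have hfb : pvFBlock p = [some ("-" ++ p.1)] := by simp [pvFBlock, h]
      rw [List.flatMap_cons, hfb]
      simp only [List.cons_append, List.nil_append, PySem.List.enumerate_cons,
        List.filter_cons, hflag, Bool.false_eq_true, if_false]
      rw [show (n : Int) + 1 = ((n + 1 : Nat) : Int) by push_cast; ring, ih]
      simp [pvBadIdx, hfb, h]
    | false =>
      have hfb : pvFBlock p = [some ("-" ++ p.1), p.2] := by simp [pvFBlock, h]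
      rw [List.flatMap_cons, hfb]
      simp only [List.cons_append, List.nil_append, PySem.List.enumerate_cons,
        List.filter_cons, hflag, Bool.false_eq_true, if_false]
      rw [show (n : Int) + 1 + 1 = ((n + 2 : Nat) : Int) by push_cast; ring]
      cases hb : (p.2 == some "None" || p.2 == none) with
      | true =>
        simp only [if_true, List.map_cons]
        rw [ih]
        have hb2 : p.2 = some "None" ∨ p.2 = none := by simpa using hb
        simp [pvBadIdx, hfb, h, pvBad, hb2]
      | false =>
        simp only [Bool.false_eq_true, if_false]
        rw [ih]
        have hb2 : ¬ p.2 = some "None" ∧ p.2.isSome = true := by simpa using hb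
        have hb3 : ¬ p.2 = none := Option.isSome_iff_ne_none.mp hb2.2
        simp [pvBadIdx, hfb, h, pvBad, hb2.1, hb3]

lemma pvAsc_lb (L : List (String × Option String)) (n : Nat) :
    ∀ i ∈ pvAsc L n, (n : Int) ≤ i := by
  induction L generalizing n with
  | nil => intro i hi; simp [pvAsc] at hi
  | cons p rest ih =>
    intro i hi
    simp only [pvAsc, List.mem_append] at hi
    rcases hi with hi | hi
    · split at hi
      · simp at hi
      · split at hi
        · simp at hi; rcases hi with rfl | rfl <;> omega
        · simp at hi
    · have h1 := ih (n + (pvFBlock p).length) i hi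
      push_cast at h1
      omega

lemma pvAsc_pairwise (L : List (String × Option String)) (n : Nat) :
    (pvAsc L n).Pairwise (· < ·) := by
  induction L generalizing n with
  | nil => simp [pvAsc]
  | cons p rest ih =>
    simp only [pvAsc]
    apply List.pairwise_append.mpr
    refine ⟨?_, ih _, ?_⟩
    · split
      · simp
      · split
        · simp
        · simp
    · intro a ha b hb
      have hb' := pvAsc_lb rest (n + (pvFBlock p).length) b hb
      push_cast at hb'
      split at ha
      · simp at ha
      · rename_i h1
        split at ha
        · have hlen : (pvFBlock p).length = 2 := by simp [pvFBlock, h1]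
          rw [hlen] at hb'
          simp at ha
          rcases ha with rfl | rfl <;> omega
        · simp at ha

lemma pvPerm (L : List (String × Option String)) (n : Nat) :
    (pvBadIdx L n ++ (pvBadIdx L n).map (· - 1)).Perm (pvAsc L n) := by
  induction L generalizing n with
  | nil => simp [pvBadIdx, pvAsc]
  | cons p rest ih =>
    cases h : (p.2 == (some "" : Option String)) with
    | true =>
      simp only [pvBadIdx, pvAsc, h, if_true, List.nil_append]
      exact ih _
    | false =>
      cases hb : pvBad p.2 with
      | false =>
        simp only [pvBadIdx, pvAsc, h, hb, Bool.false_eq_true, if_false, List.nil_append]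
        exact ih _
      | true =>
        simp only [pvBadIdx, pvAsc, h, hb, Bool.false_eq_true, if_false, if_true,
          List.cons_append, List.nil_append, List.map_cons]
        have harith : ((n : Int) + 1 - 1) = (n : Int) := by ring
        rw [harith]
        exact (List.perm_middle.cons _).trans
          ((List.Perm.swap _ _ _).trans (((ih _).cons _).cons _))

lemma pvSorted (L : List (String × Option String)) :
    PySem.List.sorted (pvBadIdx L 0 ++ (pvBadIdx L 0).map (· - 1)) (fun i => i) true =
      (pvAsc L 0).reverse := by
  apply PySem.List.sorted_rev_eq_of_perm_of_pairwise_gt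
  · exact ((pvAsc L 0).reverse_perm).trans (pvPerm L 0).symm
  · rw [List.pairwise_reverse]
    exact pvAsc_pairwise L 0

lemma pvDel (L : List (String × Option String)) (pre : List (Option String)) :
    (pvAsc L pre.length).foldr (fun i l => pyDelAt l i) (pre ++ L.flatMap pvFBlock) =
      pre ++ L.flatMap pvGBlock := by
  induction L generalizing pre with
  | nil => simp [pvAsc]
  | cons p rest ih =>
    simp only [pvAsc, List.foldr_append, List.flatMap_cons]
    have hinner : (pvAsc rest (pre.length + (pvFBlock p).length)).foldr
        (fun i l => pyDelAt l i) (pre ++ (pvFBlock p ++ rest.flatMap pvFBlock)) =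
        (pre ++ pvFBlock p) ++ rest.flatMap pvGBlock := by
      rw [show pre ++ (pvFBlock p ++ rest.flatMap pvFBlock) =
          (pre ++ pvFBlock p) ++ rest.flatMap pvFBlock by simp, ← List.length_append]
      exact ih (pre ++ pvFBlock p)
    rw [hinner]
    cases h : (p.2 == (some "" : Option String)) with
    | true =>
      have hbad : pvBad p.2 = false := by
        have := eq_of_beq h; rw [this]; decide
      simp [hbad, pvGBlock, List.append_assoc]
    | false =>
      cases hb : pvBad p.2 with
      | false => simp [hb, pvGBlock, List.append_assoc]
      | true =>
        have hfb : pvFBlock p = [some ("-" ++ p.1), p.2] := by simp [pvFBlock, h]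
        simp only [Bool.false_eq_true, if_false, if_true, List.foldr_cons, List.foldr_nil]
        rw [hfb]
        rw [show (pre ++ [some ("-" ++ p.1), p.2]) ++ rest.flatMap pvGBlock =
            pre ++ (some ("-" ++ p.1) :: p.2 :: rest.flatMap pvGBlock) by simp]
        have e1 : pyDelAt (pre ++ (some ("-" ++ p.1) :: p.2 :: rest.flatMap pvGBlock))
            ((pre.length : Int) + 1) =
            pre ++ (some ("-" ++ p.1) :: rest.flatMap pvGBlock) := by
          rw [pyDelAt, if_neg (by omega)]
          rw [show ((pre.length : Int) + 1).toNat = pre.length + 1 by omega]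
          rw [List.eraseIdx_append_of_length_le (by omega)]
          simp [List.eraseIdx]
        have e2 : pyDelAt (pre ++ (some ("-" ++ p.1) :: rest.flatMap pvGBlock))
            ((pre.length : Int)) = pre ++ rest.flatMap pvGBlock := by
          rw [pyDelAt, if_neg (by omega)]
          rw [show ((pre.length : Int)).toNat = pre.length by omega]
          rw [List.eraseIdx_append_of_length_le (le_refl pre.length)]
          simp
        rw [e1, e2]
        simp [pvGBlock, hb]

lemma pvFlatten (L : List (String × Option String)) :
    (L.flatMap pvGBlock).flatMap pvSplitOpt = (L.flatMap pvB).flatMap PySem.Str.split₀ := by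
  induction L with
  | nil => rfl
  | cons p rest ih =>
    simp only [List.flatMap_cons, List.flatMap_append, ih]
    congr 1
    rcases hp : p.2 with _ | v
    · simp [pvGBlock, pvB, pvBad, hp]
    · by_cases hn : v = "None"
      · simp [pvGBlock, pvB, pvBad, hp, hn]
      · by_cases he : v = ""
        · simp [pvGBlock, pvB, pvBad, hp, he, pvFBlock, pvSplitOpt]
        · simp [pvGBlock, pvB, pvBad, hp, hn, he, pvFBlock, pvSplitOpt]

lemma pvAlt_eq (L : List (String × Option String)) (acc : List String) :
    L.foldl (fun acc kv =>
      match kv.2 with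
      | none => acc
      | some v =>
        if v = "None" then acc
        else acc ++ ["-" ++ kv.1] ++ (if v = "" then [] else [v])) acc =
    acc ++ L.flatMap pvB := by
  have hfun : (fun (acc : List String) (kv : String × Option String) =>
      match kv.2 with
      | none => acc
      | some v =>
        if v = "None" then acc
        else acc ++ ["-" ++ kv.1] ++ (if v = "" then [] else [v])) =
      fun acc kv => acc ++ pvB kv := by
    funext acc kv
    rcases h : kv.2 with _ | v
    · simp [pvB, h]
    · by_cases hn : v = "None"
      · simp [pvB, h, hn]
      · by_cases he : v = "" <;> simp [pvB, h, hn, he]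
  rw [hfun, PySem.List.foldl_append_eq_flatMap]

lemma pvMain (l : List (String × Option String)) : dict_to_args l = dict_to_args_alt l := by
  show (let items := (PySem.Dict.ofList l).items
    let args0 : List (Option String) :=
      items.foldl (fun acc kv => acc ++ [some ("-" ++ kv.1), kv.2]) []
    let args1 := args0.filter (fun a => !(a == some ""))
    let idx : List Int :=
      ((PySem.List.enumerate args1).filter (fun p => p.2 == some "None" || p.2 == none)).map (·.1)
    let idx2 := idx ++ idx.map (· - 1)
    let idx3 := PySem.List.sorted idx2 (fun i => i) true
    let args2 := idx3.foldl (fun l i => pyDelAt l i) args1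
    args2.flatMap (fun b => match b with | some s => PySem.Str.split₀ s | none => [])) = _
  simp only []
  unfold dict_to_args_alt
  simp only []
  rw [PySem.List.foldl_append_eq_flatMap, List.nil_append, pvFilter_eq]
  rw [show (0 : Int) = ((0 : Nat) : Int) from rfl, pvBadIdx_eq, pvSorted]
  rw [List.foldl_reverse]
  have hdel := pvDel ((PySem.Dict.ofList l).items) []
  simp only [List.length_nil, List.nil_append] at hdel
  rw [hdel,
    show (fun b => match b with | some s => PySem.Str.split₀ s | none => ([] : List String)) =
      pvSplitOpt from rfl,
    pvFlatten, pvAlt_eq, List.nil_append]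

-- ===== VERDICT (by name: the statement is the Claim_ definition above) =====
theorem dict_to_args_spec : Claim_equal_dict_to_args := by
  intro l _
  unfold Spec_dict_to_args
  exact pvMain l
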